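-- pv_equiv track=rewrite | github.com/debdattasarkar/DSA | 2. GFG/2. Strings/(M) Cutting Binary String/py_sol.py | cuts
-- ===== SOURCE A (Python) =====
-- def cuts(s):
--     # code here
--     n = len(s)
--
--     # Precompute powers of 5 in binary
--     powers = set()
--     val = 1
--     while val <= int('1' * n, 2):
--         powers.add(bin(val)[2:])
--         val *= 5
--
--     dp = [float('inf')] * (n + 1)
--     dp[0] = 0  # No cuts for empty string
--
--     for i in range(n):
--         if s[i] == '0':
--             continue  # Skip leading zero
--         for j in range(i + 1, n + 1):
--             if s[i:j] in powers:
--                 dp[j] = min(dp[j], dp[i] + 1)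
--
--     return dp[n] if dp[n] != float('inf') else -1
-- ===== SOURCE B (Python) =====
-- def cuts(s):
--     n = len(s)
--     # binary representations of all powers of 5 that fit in n bits
--     powers = []
--     v = 1
--     while v < 1 << n:
--         powers.append(bin(v)[2:])
--         v *= 5
--     # jump graph: an edge i -> i+len(p) whenever a power p matches s at position i
--     edges = [[] for _ in range(n + 1)]
--     for p in powers:
--         L = len(p)
--         for i in range(n - L + 1):
--             if s[i:i + L] == p:
--                 edges[i].append(i + L)
--     # BFS from position 0: level = number of pieces used so far
--     seen = [False] * (n + 1)
--     seen[0] = True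
--     frontier = [0]
--     dist = 0
--     while frontier:
--         nxt = []
--         for i in frontier:
--             if i == n:
--                 return dist
--             for j in edges[i]:
--                 if not seen[j]:
--                     seen[j] = True
--                     nxt.append(j)
--         frontier = nxt
--         dist += 1
--     return -1
-- ===== Notes on version B (the rewrite author's own statement) =====
-- stated objective: alternative
-- what changed: B inverts the search: instead of A's prefix DP that hashes every substring s[i:j] against a set of power strings, B builds an explicit jump graph by pattern-matching each power of 5 at every position (iterating over the few powers, not over all O(n^2) substrings) and then finds the minimum number of pieces by breadth-first search over positions, level = pieces used.
-- outside the precondition, e.g. on cuts(''): A raises ValueError, B returns 0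
import Mathlib
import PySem

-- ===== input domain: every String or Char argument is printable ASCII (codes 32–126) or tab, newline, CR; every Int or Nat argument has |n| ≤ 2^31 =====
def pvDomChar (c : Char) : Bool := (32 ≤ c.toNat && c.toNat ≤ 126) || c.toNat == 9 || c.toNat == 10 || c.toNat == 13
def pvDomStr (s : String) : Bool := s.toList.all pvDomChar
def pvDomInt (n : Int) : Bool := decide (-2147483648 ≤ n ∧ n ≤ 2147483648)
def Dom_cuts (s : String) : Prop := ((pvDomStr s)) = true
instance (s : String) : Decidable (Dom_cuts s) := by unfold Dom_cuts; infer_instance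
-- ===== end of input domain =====

-- B replaces A's prefix DP (which hashes every substring against a set of power-of-5 strings) by an
-- explicit jump graph built by matching each power pattern at every position, searched by BFS.

-- ===== PORT A =====

-- bin(v)[2:] : canonical binary digits of v, most significant first, ported by hand
-- (exact for v ≥ 1, the only values both Pythons pass; bin(0)[2:] = "0")
def pyBin (v : Nat) : List Char :=
  if h : v < 2 then [if v = 1 then '1' else '0']
  else pyBin (v / 2) ++ [if v % 2 = 1 then '1' else '0']
termination_by v
decreasing_by exact Nat.div_lt_self (by omega) (by omega)

-- while val <= bound: powers.add(bin(val)[2:]); val *= 5   (hv is only the termination invariant val ≥ 1)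
def buildPowersA (bound val : Nat) (hv : 1 ≤ val) (acc : PySem.Set (List Char)) : PySem.Set (List Char) :=
  if h : val ≤ bound then buildPowersA bound (5 * val) (by omega) (PySem.Set.add acc (pyBin val)) else acc
termination_by bound + 1 - val
decreasing_by omega

-- min over int-or-infinity, none = float('inf') (Python's min on such values)
def omin (a b : Option Int) : Option Int :=
  match a, b with
  | some x, some y => some (min x y)
  | some x, none => some x
  | none, b => b

-- inner loop: for j in range(i+1, n+1): if s[i:j] in powers: dp[j] = min(dp[j], dp[i]+1)
-- s[i:j] = (l.drop i).take (j-i) here (0 ≤ i ≤ j, so this equals PySem.List.slice)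
def innerA (l : List Char) (n : Nat) (powers : PySem.Set (List Char)) (i j : Nat)
    (dp : List (Option Int)) : List (Option Int) :=
  if j ≤ n then
    let dp' := if powers.contains ((l.drop i).take (j - i)) then
        dp.set j (omin (dp.getD j none) ((dp.getD i none).map (· + 1)))
      else dp
    innerA l n powers i (j + 1) dp'
  else dp
termination_by n + 1 - j

-- outer loop: for i in range(n): if s[i] == '0': continue; <inner loop>   (s[i] is in range: i < n)
def outerA (l : List Char) (n : Nat) (powers : PySem.Set (List Char)) (i : Nat)
    (dp : List (Option Int)) : List (Option Int) :=
  if i < n then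
    let dp' := if l.getD i ' ' = '0' then dp else innerA l n powers i (i + 1) dp
    outerA l n powers (i + 1) dp'
  else dp
termination_by n - i

def cuts (s : String) : Int :=
  let l := s.toList
  let n := l.length
  -- int('1'*n, 2) = 2^n - 1 (exact for n ≥ 1; n = 0 raises ValueError there, excluded by Pre_cuts)
  let powers := buildPowersA (2 ^ n - 1) 1 (Nat.le_refl 1) PySem.Set.empty
  -- dp = [float('inf')] * (n+1); dp[0] = 0 — float('inf') modelled as none (every finite entry is an int)
  let dp := outerA l n powers 0 ((List.replicate (n + 1) (none : Option Int)).set 0 (some 0))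
  match dp.getD n none with
  | some v => v
  | none => -1

-- ===== PORT B =====

-- while v < 1 << n: powers.append(bin(v)[2:]); v *= 5   (1 << n = 2^n; hv is the termination invariant v ≥ 1)
def buildPowList (n v : Nat) (hv : 1 ≤ v) (acc : List (List Char)) : List (List Char) :=
  if h : v < 2 ^ n then buildPowList n (5 * v) (by omega) (acc ++ [pyBin v]) else acc
termination_by 2 ^ n - v
decreasing_by omega

-- for i in range(n - L + 1): if s[i:i+L] == p: edges[i].append(i + L)
-- (i ranges over i + L ≤ n, exactly range(n - L + 1); s[i:i+L] = (l.drop i).take p.length)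
def addPow (l : List Char) (n : Nat) (p : List Char) (i : Nat) (edges : List (List Nat)) :
    List (List Nat) :=
  if i + p.length ≤ n then
    let edges' := if (l.drop i).take p.length = p then
        edges.set i (edges.getD i [] ++ [i + p.length])
      else edges
    addPow l n p (i + 1) edges'
  else edges
termination_by n + 1 - i

-- for j in edges[i]: if not seen[j]: seen[j] = True; nxt.append(j)
def procEdges (js : List Nat) (seen : List Bool) (nxt : List Nat) : List Bool × List Nat :=
  match js with
  | [] => (seen, nxt)
  | j :: rest =>
    if seen.getD j false then procEdges rest seen nxt
    else procEdges rest (seen.set j true) (nxt ++ [j])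

-- for i in frontier: if i == n: return dist; <edge loop>   (.inl = the early return)
def procF (edges : List (List Nat)) (n : Nat) (frontier : List Nat) (seen : List Bool)
    (nxt : List Nat) (dist : Int) : Sum Int (List Bool × List Nat) :=
  match frontier with
  | [] => .inr (seen, nxt)
  | i :: rest =>
    if i = n then .inl dist
    else
      match procEdges (edges.getD i []) seen nxt with
      | (seen', nxt') => procF edges n rest seen' nxt' dist

-- while frontier: … frontier = nxt; dist += 1   (fuel only makes the loop structural; n+2 levels
-- always suffice — a node in BFS level d has position ≥ d ≤ n, proved in bfs_spec below)
def bfsLoop (edges : List (List Nat)) (n : Nat) : Nat → List Nat → List Bool → Int → Int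
  | 0, _, _, _ => -1
  | fuel + 1, frontier, seen, dist =>
    if frontier = [] then -1
    else
      match procF edges n frontier seen [] dist with
      | .inl d => d
      | .inr (seen', nxt) => bfsLoop edges n fuel nxt seen' (dist + 1)

def cuts_alt (s : String) : Int :=
  let l := s.toList
  let n := l.length
  let powers := buildPowList n 1 (Nat.le_refl 1) []
  let edges := powers.foldl (fun e p => addPow l n p 0 e) (List.replicate (n + 1) ([] : List Nat))
  bfsLoop edges n (n + 2) [0] ((List.replicate (n + 1) false).set 0 true) 0

-- ===== PRECONDITION & SPEC =====
-- Pre_ excludes only the empty string, on which A raises ValueError (int('', 2)).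
def Pre_cuts (s : String) : Prop := s ≠ ""
instance (s : String) : Decidable (Pre_cuts s) := by unfold Pre_cuts; infer_instance

def pvWitness_cuts : String := "101"

def Spec_cuts (s : String) (out : Int) : Prop := out = cuts_alt s
instance (s : String) (out : Int) : Decidable (Spec_cuts s out) := by unfold Spec_cuts; infer_instance

-- ===== CLAIM (what is proved, stated in full; the proofs are below) =====
def Claim_equal_cuts : Prop := ∀ (s : String), Dom_cuts s → Pre_cuts s → Spec_cuts s (cuts s)

-- ===== LEMMAS AND PROOFS =====

-- s[i:j] as both programs see it
def sub (l : List Char) (i j : Nat) : List Char := (l.drop i).take (j - i)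

-- "t is the binary string of a power of 5 below 2^n" — what A's set and B's list both hold
def IsPow (n : Nat) (t : List Char) : Prop := ∃ k, t = pyBin (5 ^ k) ∧ 5 ^ k < 2 ^ n

-- the jump relation: one valid piece from position i to position j
def Edge (l : List Char) (n i j : Nat) : Prop := i < j ∧ j ≤ n ∧ IsPow n (sub l i j)

-- chains of pieces from position 0, built edge by edge at the END; the bound b restricts
-- every edge's start (A's outer loop processes starts in increasing order)
inductive RB (l : List Char) (n : Nat) : Nat → Nat → Nat → Prop
  | zero (b : Nat) : RB l n b 0 0
  | succ {b i t k : Nat} : RB l n b i k → Edge l n i t → i < b → RB l n b t (k + 1)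

-- minimal chain length (BFS distance)
def MinD (l : List Char) (n t d : Nat) : Prop :=
  RB l n n t d ∧ ∀ k, RB l n n t k → d ≤ k

-- dp-cell value vs the set of achievable chain lengths: none = no chain, some v = minimum
def OptMin (o : Option Int) (S : Nat → Prop) : Prop :=
  match o with
  | none => ∀ k, ¬ S k
  | some v => ∃ m : Nat, v = (m : Int) ∧ S m ∧ ∀ k, S k → m ≤ k


-- ---- small list/indexing facts ----

lemma getD_set {α : Type} (dp : List α) (j k : Nat) (v d : α) (hj : j < dp.length) :
    (dp.set j v).getD k d = if k = j then v else dp.getD k d := by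
  simp only [List.getD_eq_getElem?_getD, List.getElem?_set]
  by_cases h : j = k
  · subst h; simp [hj]
  · rw [if_neg h, if_neg (fun hc => h hc.symm)]

lemma head?_take_drop (l : List Char) (i j : Nat) (hi : i < l.length) (hij : i < j) :
    ((l.drop i).take (j - i)).head? = some (l.getD i ' ') := by
  obtain ⟨m, hm⟩ : ∃ m, j - i = m + 1 := ⟨j - i - 1, by omega⟩
  rw [hm, List.drop_eq_getElem_cons hi, List.take_succ_cons]
  simp [List.getD_eq_getElem?_getD, List.getElem?_eq_getElem hi]

lemma sub_length (l : List Char) (i j : Nat) (hij : i ≤ j) (hj : j ≤ l.length) :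
    (sub l i j).length = j - i := by
  simp [sub]
  omega

-- ---- pyBin facts ----

lemma pyBin_head (v : Nat) (hv : 1 ≤ v) : (pyBin v).head? = some '1' := by
  induction v using pyBin.induct with
  | case1 v h =>
    have : v = 1 := by omega
    subst this; simp [pyBin]
  | case2 v h ih =>
    rw [pyBin, dif_neg h]
    have h2 : 1 ≤ v / 2 := Nat.le_div_iff_mul_le (by omega) |>.mpr (by omega)
    have := ih h2
    rcases hx : pyBin (v / 2) with _ | ⟨a, t⟩
    · simp [hx] at this
    · simp [hx] at this ⊢; exact this

lemma pyBin_ne_nil (v : Nat) : pyBin v ≠ [] := by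
  rw [pyBin]
  split <;> simp

-- ---- chain lemmas ----

lemma rb_mono {l : List Char} {n b b' t k : Nat} (h : RB l n b t k) (hb : b ≤ b') :
    RB l n b' t k := by
  induction h with
  | zero => exact RB.zero b'
  | succ hc he hi ih => exact RB.succ ih he (by omega)

lemma rb_bounds {l : List Char} {n b t k : Nat} (h : RB l n b t k) : k ≤ t ∧ t ≤ n := by
  induction h with
  | zero => exact ⟨le_refl 0, Nat.zero_le n⟩
  | succ hc he hi ih => obtain ⟨h1, h2⟩ := he; omega

lemma rb_zero {l : List Char} {n t k : Nat} (h : RB l n 0 t k) : t = 0 ∧ k = 0 := by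
  cases h with
  | zero => exact ⟨rfl, rfl⟩
  | succ hc he hi => omega

lemma rb_succ_iff {l : List Char} {n i t k : Nat} :
    RB l n (i + 1) t k ↔ RB l n i t k ∨ ∃ m, k = m + 1 ∧ RB l n i i m ∧ Edge l n i t := by
  constructor
  · intro h
    have aux : ∀ {b t k}, RB l n b t k → b = i + 1 →
        RB l n i t k ∨ ∃ m, k = m + 1 ∧ RB l n i i m ∧ Edge l n i t := by
      intro b t k h
      induction h with
      | zero => exact fun _ => Or.inl (RB.zero i)
      | @succ a t' k' hc he hi ih =>
        rintro rfl
        rcases ih rfl with hc' | ⟨m, rfl, hm, he'⟩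
        · by_cases ha : a = i
          · subst ha; exact Or.inr ⟨k', rfl, hc', he⟩
          · exact Or.inl (RB.succ hc' he (by omega))
        · -- the prefix itself ends with an edge from i to a, so i < a ≤ i: impossible
          exact absurd he'.1 (by omega)
    exact aux h rfl
  · rintro (h | ⟨m, rfl, hm, he⟩)
    · exact rb_mono h (by omega)
    · exact RB.succ (rb_mono hm (by omega)) he (by omega)

lemma edge_head {l : List Char} {i t : Nat} (h : Edge l l.length i t) : l.getD i ' ' = '1' := by
  obtain ⟨hit, htn, k, hk, _⟩ := h
  have hhd := pyBin_head (5 ^ k) (Nat.one_le_pow _ _ (by omega))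
  rw [← hk] at hhd
  rw [sub] at hhd
  rw [head?_take_drop l i t (by omega) hit] at hhd
  exact (Option.some_inj.mp hhd)

lemma rb_succ_decomp {l : List Char} {n t k : Nat} (h : RB l n n t (k + 1)) :
    ∃ i, RB l n n i k ∧ Edge l n i t := by
  cases h with
  | succ hc he hi => exact ⟨_, hc, he⟩

lemma rb_len_zero {l : List Char} {n t : Nat} (h : RB l n n t 0) : t = 0 := by
  cases h; rfl

-- ---- OptMin lemmas ----

lemma optMin_congr {o : Option Int} {S T : Nat → Prop} (h : OptMin o S)
    (hST : ∀ k, S k ↔ T k) : OptMin o T := by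
  cases o with
  | none => intro k hk; exact h k ((hST k).mpr hk)
  | some v =>
    obtain ⟨m, hm, hS, hmin⟩ := h
    exact ⟨m, hm, (hST m).mp hS, fun k hk => hmin k ((hST k).mpr hk)⟩

lemma optMin_relax {o oi : Option Int} {S T : Nat → Prop} (h : OptMin o S) (hi : OptMin oi T) :
    OptMin (omin o (oi.map (· + 1))) (fun k => S k ∨ ∃ m, k = m + 1 ∧ T m) := by
  cases o with
  | none =>
    cases oi with
    | none =>
      intro k hk
      rcases hk with hk | ⟨m, rfl, hm⟩
      · exact h k hk
      · exact hi m hm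
    | some w =>
      obtain ⟨m, rfl, hT, hmin⟩ := hi
      exact ⟨m + 1, by push_cast; ring, Or.inr ⟨m, rfl, hT⟩, by
        rintro k (hk | ⟨m', rfl, hm'⟩)
        · exact absurd hk (h k)
        · have := hmin m' hm'; omega⟩
  | some v =>
    obtain ⟨m, rfl, hS, hmin⟩ := h
    cases oi with
    | none =>
      refine ⟨m, rfl, Or.inl hS, ?_⟩
      rintro k (hk | ⟨m', rfl, hm'⟩)
      · exact hmin k hk
      · exact absurd hm' (hi m')
    | some w =>
      obtain ⟨m2, rfl, hT, hmin2⟩ := hi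
      simp only [omin, Option.map_some]
      by_cases hc : m ≤ m2 + 1
      · refine ⟨m, by push_cast; omega, Or.inl hS, ?_⟩
        rintro k (hk | ⟨m', rfl, hm'⟩)
        · exact hmin k hk
        · have := hmin2 m' hm'; omega
      · refine ⟨m2 + 1, by push_cast; omega, Or.inr ⟨m2, rfl, hT⟩, ?_⟩
        rintro k (hk | ⟨m', rfl, hm'⟩)
        · have := hmin k hk; omega
        · have := hmin2 m' hm'; omega

-- ---- A's powers set ----

lemma mem_buildPowersA (bound : Nat) : ∀ (val : Nat) (hv : 1 ≤ val) (acc : PySem.Set (List Char))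
    (x : List Char), x ∈ buildPowersA bound val hv acc ↔
      x ∈ acc ∨ ∃ k, x = pyBin (5 ^ k * val) ∧ 5 ^ k * val ≤ bound := by
  intro val hv acc x
  induction val, hv, acc using buildPowersA.induct bound with
  | case1 val hv acc h ih =>
    rw [buildPowersA, dif_pos h, ih, PySem.Set.mem_add]
    constructor
    · rintro ((hx | hx) | ⟨k, hk1, hk2⟩)
      · exact Or.inl hx
      · exact Or.inr ⟨0, by simpa using hx, by simpa using h⟩
      · refine Or.inr ⟨k + 1, by rw [hk1]; congr 1; ring, ?_⟩
        have e : 5 ^ (k + 1) * val = 5 ^ k * (5 * val) := by ring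
        omega
    · rintro (hx | ⟨k, hk1, hk2⟩)
      · exact Or.inl (Or.inl hx)
      · rcases k with _ | k
        · exact Or.inl (Or.inr (by simpa using hk1))
        · refine Or.inr ⟨k, by rw [hk1]; congr 1; ring, ?_⟩
          have e : 5 ^ (k + 1) * val = 5 ^ k * (5 * val) := by ring
          omega
  | case2 val hv acc h =>
    rw [buildPowersA, dif_neg h]
    constructor
    · exact Or.inl
    · rintro (hx | ⟨k, hk1, hk2⟩)
      · exact hx
      · exfalso
        have h1 : 1 ≤ 5 ^ k := Nat.one_le_pow _ _ (by omega)
        have : val ≤ 5 ^ k * val := Nat.le_mul_of_pos_left _ h1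
        omega

lemma HA_final (n : Nat) : ∀ x, (buildPowersA (2 ^ n - 1) 1 (Nat.le_refl 1) PySem.Set.empty).contains x = true ↔
    IsPow n x := by
  intro x
  rw [PySem.Set.contains_iff, mem_buildPowersA]
  have h2 : 1 ≤ 2 ^ n := Nat.one_le_pow _ _ (by omega)
  constructor
  · rintro (hx | ⟨k, hk1, hk2⟩)
    · simp [PySem.Set.empty] at hx
    · exact ⟨k, by simpa using hk1, by omega⟩
  · rintro ⟨k, hk1, hk2⟩
    exact Or.inr ⟨k, by simpa using hk1, by omega⟩

-- ---- A's loops compute the minimal chain length ----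

lemma innerA_noop (l : List Char) (n : Nat) (powers : PySem.Set (List Char))
    (HA : ∀ x, powers.contains x = true ↔ IsPow n x)
    (hn : n = l.length) (i : Nat) (hi : i < n) (h1 : l.getD i ' ' ≠ '1') :
    ∀ (m j : Nat) (dpA : List (Option Int)), n + 1 ≤ j + m → i + 1 ≤ j →
      innerA l n powers i j dpA = dpA := by
  intro m
  induction m with
  | zero =>
    intro j dpA hjm hij
    rw [innerA, if_neg (by omega)]
  | succ m ih =>
    intro j dpA hjm hij
    by_cases hjn : j ≤ n
    · have hil : i < l.length := by omega
      have hcond : ¬ (powers.contains ((l.drop i).take (j - i)) = true) := by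
        rw [HA]
        rintro ⟨k, hk1, -⟩
        have h5 : 1 ≤ 5 ^ k := Nat.one_le_pow _ _ (by omega)
        have hhd := pyBin_head (5 ^ k) h5
        rw [← hk1, head?_take_drop l i j hil (by omega)] at hhd
        exact h1 (by simpa using hhd)
      rw [innerA, if_pos hjn]
      dsimp only
      rw [if_neg hcond]
      exact ih (j + 1) dpA (by omega) (by omega)
    · rw [innerA, if_neg hjn]

lemma no_edge_of_ne_one {l : List Char} {n i : Nat} (hn : n = l.length) (hi : i < n)
    (h1 : l.getD i ' ' ≠ '1') : ∀ t, ¬ Edge l n i t := by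
  intro t he
  subst hn
  exact h1 (edge_head he)

lemma innerA_inv (l : List Char) (n : Nat) (powers : PySem.Set (List Char))
    (HA : ∀ x, powers.contains x = true ↔ IsPow n x) (i : Nat) (hi : i < n) :
    ∀ (m j : Nat) (dp : List (Option Int)), n + 1 ≤ j + m → i + 1 ≤ j → dp.length = n + 1 →
    (∀ t, t ≤ n → OptMin (dp.getD t none)
      (fun k => RB l n i t k ∨ ∃ mm, k = mm + 1 ∧ RB l n i i mm ∧ Edge l n i t ∧ t < j)) →
    (innerA l n powers i j dp).length = n + 1 ∧
    ∀ t, t ≤ n → OptMin ((innerA l n powers i j dp).getD t none)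
      (fun k => RB l n i t k ∨ ∃ mm, k = mm + 1 ∧ RB l n i i mm ∧ Edge l n i t ∧ t < n + 1) := by
  intro m
  induction m with
  | zero =>
    intro j dp hjm hij hlen hinv
    rw [innerA, if_neg (by omega)]
    refine ⟨hlen, fun t ht => ?_⟩
    refine optMin_congr (hinv t ht) fun k => ?_
    constructor
    · rintro (h | ⟨mm, rfl, hm, he, -⟩)
      · exact Or.inl h
      · exact Or.inr ⟨mm, rfl, hm, he, by omega⟩
    · rintro (h | ⟨mm, rfl, hm, he, -⟩)
      · exact Or.inl h
      · exact Or.inr ⟨mm, rfl, hm, he, by omega⟩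
  | succ m ih =>
    intro j dp hjm hij hlen hinv
    by_cases hjn : j ≤ n
    · rw [innerA, if_pos hjn]
      dsimp only
      by_cases hc : powers.contains ((l.drop i).take (j - i)) = true
      · rw [if_pos hc]
        have hedge : Edge l n i j := ⟨by omega, hjn, (HA _).mp hc⟩
        refine ih (j + 1) _ (by omega) (by omega) (by simp [hlen]) ?_
        intro t ht
        by_cases htj : t = j
        · subst htj
          have hgd : (dp.set t (omin (dp.getD t none) ((dp.getD i none).map (· + 1)))).getD t none
              = omin (dp.getD t none) ((dp.getD i none).map (· + 1)) := by
            rw [getD_set _ _ _ _ _ (by omega), if_pos rfl]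
          rw [hgd]
          have hSj : OptMin (dp.getD t none) (fun k => RB l n i t k) :=
            optMin_congr (hinv t ht) fun k => by
              constructor
              · rintro (h | ⟨mm, rfl, hm, he, hlt⟩)
                · exact h
                · omega
              · exact Or.inl
          have hSi : OptMin (dp.getD i none) (fun k => RB l n i i k) :=
            optMin_congr (hinv i (by omega)) fun k => by
              constructor
              · rintro (h | ⟨mm, rfl, hm, he, hlt⟩)
                · exact h
                · obtain ⟨h1, -, -⟩ := he; omega
              · exact Or.inl
          refine optMin_congr (optMin_relax hSj hSi) fun k => ?_
          constructor
          · rintro (h | ⟨mm, rfl, hm⟩)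
            · exact Or.inl h
            · exact Or.inr ⟨mm, rfl, hm, hedge, by omega⟩
          · rintro (h | ⟨mm, rfl, hm, -, -⟩)
            · exact Or.inl h
            · exact Or.inr ⟨mm, rfl, hm⟩
        · have hgd : (dp.set j (omin (dp.getD j none) ((dp.getD i none).map (· + 1)))).getD t none
              = dp.getD t none := by
            rw [getD_set _ _ _ _ _ (by omega), if_neg htj]
          rw [hgd]
          refine optMin_congr (hinv t ht) fun k => ?_
          constructor
          · rintro (h | ⟨mm, rfl, hm, he, hlt⟩)
            · exact Or.inl h
            · exact Or.inr ⟨mm, rfl, hm, he, by omega⟩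
          · rintro (h | ⟨mm, rfl, hm, he, hlt⟩)
            · exact Or.inl h
            · exact Or.inr ⟨mm, rfl, hm, he, by omega⟩
      · rw [if_neg hc]
        have hnedge : ¬ Edge l n i j := fun he => hc ((HA _).mpr he.2.2)
        refine ih (j + 1) dp (by omega) (by omega) hlen ?_
        intro t ht
        refine optMin_congr (hinv t ht) fun k => ?_
        constructor
        · rintro (h | ⟨mm, rfl, hm, he, hlt⟩)
          · exact Or.inl h
          · exact Or.inr ⟨mm, rfl, hm, he, by omega⟩
        · rintro (h | ⟨mm, rfl, hm, he, hlt⟩)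
          · exact Or.inl h
          · refine Or.inr ⟨mm, rfl, hm, he, ?_⟩
            rcases Nat.lt_or_ge t j with h' | h'
            · exact h'
            · have : t = j := by omega
              exact absurd (this ▸ he) hnedge
    · rw [innerA, if_neg hjn]
      refine ⟨hlen, fun t ht => ?_⟩
      refine optMin_congr (hinv t ht) fun k => ?_
      constructor
      · rintro (h | ⟨mm, rfl, hm, he, -⟩)
        · exact Or.inl h
        · exact Or.inr ⟨mm, rfl, hm, he, by omega⟩
      · rintro (h | ⟨mm, rfl, hm, he, hlt⟩)
        · exact Or.inl h
        · refine Or.inr ⟨mm, rfl, hm, he, ?_⟩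
          obtain ⟨-, h2, -⟩ := he
          omega


lemma outerA_inv (l : List Char) (n : Nat) (powers : PySem.Set (List Char))
    (HA : ∀ x, powers.contains x = true ↔ IsPow n x) (hn : n = l.length) :
    ∀ (m i : Nat) (dp : List (Option Int)), n ≤ i + m → i ≤ n → dp.length = n + 1 →
    (∀ t, t ≤ n → OptMin (dp.getD t none) (fun k => RB l n i t k)) →
    (outerA l n powers i dp).length = n + 1 ∧
    ∀ t, t ≤ n → OptMin ((outerA l n powers i dp).getD t none) (fun k => RB l n n t k) := by
  intro m
  induction m with
  | zero =>
    intro i dp him hile hlen hinv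
    have : i = n := by omega
    subst this
    rw [outerA, if_neg (by omega)]
    exact ⟨hlen, hinv⟩
  | succ m ih =>
    intro i dp him hile hlen hinv
    by_cases hin : i < n
    · rw [outerA, if_pos hin]
      dsimp only
      have hskip : l.getD i ' ' ≠ '1' →
          ∀ t, t ≤ n → OptMin (dp.getD t none) (fun k => RB l n (i + 1) t k) := by
        intro h1 t ht
        refine optMin_congr (hinv t ht) fun k => ?_
        rw [rb_succ_iff]
        constructor
        · exact Or.inl
        · rintro (h | ⟨mm, rfl, hm, he⟩)
          · exact h
          · exact absurd he (no_edge_of_ne_one hn hin h1 t)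
      by_cases h0 : l.getD i ' ' = '0'
      · rw [if_pos h0]
        exact ih (i + 1) dp (by omega) (by omega) hlen (hskip (by rw [h0]; decide))
      · rw [if_neg h0]
        by_cases h1 : l.getD i ' ' = '1'
        · obtain ⟨hlen', hinv'⟩ := innerA_inv l n powers HA i hin (n - i) (i + 1) dp
            (by omega) (by omega) hlen (by
              intro t ht
              refine optMin_congr (hinv t ht) fun k => ?_
              constructor
              · exact Or.inl
              · rintro (h | ⟨mm, rfl, hm, he, hlt⟩)
                · exact h
                · obtain ⟨ha, -, -⟩ := he
                  omega)
          refine ih (i + 1) _ (by omega) (by omega) hlen' ?_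
          intro t ht
          refine optMin_congr (hinv' t ht) fun k => ?_
          rw [rb_succ_iff]
          constructor
          · rintro (h | ⟨mm, rfl, hm, he, -⟩)
            · exact Or.inl h
            · exact Or.inr ⟨mm, rfl, hm, he⟩
          · rintro (h | ⟨mm, rfl, hm, he⟩)
            · exact Or.inl h
            · exact Or.inr ⟨mm, rfl, hm, he, by omega⟩
        · rw [innerA_noop l n powers HA hn i hin h1 (n - i) (i + 1) dp (by omega) (by omega)]
          exact ih (i + 1) dp (by omega) (by omega) hlen (hskip h1)
    · rw [outerA, if_neg hin]
      have : i = n := by omega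
      subst this
      exact ⟨hlen, hinv⟩


-- ---- B's powers list and edge lists ----

lemma mem_buildPowList (n : Nat) : ∀ (v : Nat) (hv : 1 ≤ v) (acc : List (List Char))
    (x : List Char), x ∈ buildPowList n v hv acc ↔
      x ∈ acc ∨ ∃ k, x = pyBin (5 ^ k * v) ∧ 5 ^ k * v < 2 ^ n := by
  intro v hv acc x
  induction v, hv, acc using buildPowList.induct n with
  | case1 v hv acc h ih =>
    rw [buildPowList, dif_pos h, ih]
    simp only [List.mem_append, List.mem_singleton]
    constructor
    · rintro ((hx | hx) | ⟨k, hk1, hk2⟩)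
      · exact Or.inl hx
      · exact Or.inr ⟨0, by simpa using hx, by simpa using h⟩
      · refine Or.inr ⟨k + 1, by rw [hk1]; congr 1; ring, ?_⟩
        have e : 5 ^ (k + 1) * v = 5 ^ k * (5 * v) := by ring
        omega
    · rintro (hx | ⟨k, hk1, hk2⟩)
      · exact Or.inl (Or.inl hx)
      · rcases k with _ | k
        · exact Or.inl (Or.inr (by simpa using hk1))
        · refine Or.inr ⟨k, by rw [hk1]; congr 1; ring, ?_⟩
          have e : 5 ^ (k + 1) * v = 5 ^ k * (5 * v) := by ring
          omega
  | case2 v hv acc h =>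
    rw [buildPowList, dif_neg h]
    constructor
    · exact Or.inl
    · rintro (hx | ⟨k, hk1, hk2⟩)
      · exact hx
      · exfalso
        have h1 : 1 ≤ 5 ^ k := Nat.one_le_pow _ _ (by omega)
        have : v ≤ 5 ^ k * v := Nat.le_mul_of_pos_left _ h1
        omega


lemma powB_mem (n : Nat) (x : List Char) :
    x ∈ buildPowList n 1 (Nat.le_refl 1) [] ↔ IsPow n x := by
  rw [mem_buildPowList]
  unfold IsPow
  simp


lemma addPow_length (l : List Char) (n : Nat) (p : List Char) :
    ∀ (m i : Nat) (e : List (List Nat)), n + 1 ≤ i + m → (addPow l n p i e).length = e.length := by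
  intro m
  induction m with
  | zero =>
    intro i e him
    rw [addPow, if_neg (by omega)]
  | succ m ih =>
    intro i e him
    by_cases h : i + p.length ≤ n
    · rw [addPow, if_pos h]
      dsimp only
      rw [ih (i + 1) _ (by omega)]
      split <;> simp
    · rw [addPow, if_neg h]


lemma addPow_getD (l : List Char) (n : Nat) (p : List Char) :
    ∀ (m i0 : Nat) (e : List (List Nat)), n + 1 ≤ i0 + m → e.length = n + 1 → ∀ t, t ≤ n →
    (addPow l n p i0 e).getD t [] = e.getD t [] ++
      (if i0 ≤ t ∧ t + p.length ≤ n ∧ sub l t (t + p.length) = p then [t + p.length] else []) := by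
  intro m
  induction m with
  | zero =>
    intro i0 e him he t ht
    rw [addPow, if_neg (by omega), if_neg (by omega), List.append_nil]
  | succ m ih =>
    intro i0 e him he t ht
    by_cases h : i0 + p.length ≤ n
    · rw [addPow, if_pos h]
      dsimp only
      set e' := if (l.drop i0).take p.length = p then
          e.set i0 (e.getD i0 [] ++ [i0 + p.length]) else e with he'
      have hlen' : e'.length = n + 1 := by
        rw [he']; split <;> simp [he]
      rw [ih (i0 + 1) e' (by omega) hlen' t ht]
      by_cases hti : t = i0
      · subst hti
        rw [if_neg (by omega), List.append_nil, he']
        by_cases hm : (l.drop t).take p.length = p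
        · rw [if_pos hm, getD_set _ _ _ _ _ (by omega), if_pos rfl,
            if_pos ⟨le_refl t, h, by simpa [sub] using hm⟩]
        · rw [if_neg hm, if_neg (by
            rintro ⟨-, -, hs⟩
            exact hm (by simpa [sub] using hs))]
          simp
      · have he'getD : e'.getD t [] = e.getD t [] := by
          rw [he']; split
          · rw [getD_set _ _ _ _ _ (by omega), if_neg hti]
          · rfl
        rw [he'getD]
        congr 1
        by_cases hle : i0 + 1 ≤ t
        · exact if_congr ⟨fun ⟨a, b, c⟩ => ⟨by omega, b, c⟩, fun ⟨a, b, c⟩ => ⟨by omega, b, c⟩⟩ rfl rfl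
        · rw [if_neg (by omega), if_neg (by omega)]
    · rw [addPow, if_neg h, if_neg (by omega), List.append_nil]


lemma edges_fold (l : List Char) (n : Nat) :
    ∀ (ps : List (List Char)) (e : List (List Nat)), e.length = n + 1 →
    (ps.foldl (fun e p => addPow l n p 0 e) e).length = n + 1 ∧
    ∀ t, t ≤ n → ∀ j, j ∈ (ps.foldl (fun e p => addPow l n p 0 e) e).getD t [] ↔
      j ∈ e.getD t [] ∨ ∃ p ∈ ps, t + p.length ≤ n ∧ sub l t (t + p.length) = p ∧ j = t + p.length := by
  intro ps
  induction ps with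
  | nil =>
    intro e he
    exact ⟨he, by simp⟩
  | cons p ps ih =>
    intro e he
    have hlen : (addPow l n p 0 e).length = n + 1 := by
      rw [addPow_length l n p (n + 1) 0 e (by omega), he]
    obtain ⟨h1, h2⟩ := ih (addPow l n p 0 e) hlen
    refine ⟨by simpa using h1, ?_⟩
    intro t ht j
    rw [List.foldl_cons, h2 t ht j,
      addPow_getD l n p (n + 1) 0 e (by omega) he t ht]
    simp only [List.mem_append, List.mem_cons]
    constructor
    · rintro ((hj | hj) | ⟨q, hq, hrest⟩)
      · exact Or.inl hj
      · split at hj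
        · next hcond =>
          simp only [List.mem_singleton] at hj
          exact Or.inr ⟨p, Or.inl rfl, hcond.2.1, hcond.2.2, hj⟩
        · simp at hj
      · exact Or.inr ⟨q, Or.inr hq, hrest⟩
    · rintro (hj | ⟨q, hq | hq, hrest⟩)
      · exact Or.inl (Or.inl hj)
      · subst hq
        exact Or.inl (Or.inr (by
          rw [if_pos ⟨Nat.zero_le t, hrest.1, hrest.2.1⟩]
          simp [hrest.2.2]))
      · exact Or.inr ⟨q, hq, hrest⟩


lemma edge_iff (l : List Char) (n : Nat) (hn : n = l.length) (t : Nat) (ht : t ≤ n) (j : Nat) :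
    (j ∈ ((buildPowList n 1 (Nat.le_refl 1) []).foldl (fun e p => addPow l n p 0 e)
        (List.replicate (n + 1) ([] : List Nat))).getD t [] ↔ Edge l n t j) := by
  obtain ⟨-, hmem⟩ := edges_fold l n (buildPowList n 1 (Nat.le_refl 1) [])
    (List.replicate (n + 1) ([] : List Nat)) (by simp)
  rw [hmem t ht j]
  have hrep : (List.replicate (n + 1) ([] : List Nat)).getD t [] = [] := by
    simp [List.getD_eq_getElem?_getD, List.getElem?_replicate]
    split <;> rfl
  rw [hrep]
  simp only [List.mem_nil_iff, false_or]
  constructor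
  · rintro ⟨p, hp, hpl, hsub, rfl⟩
    obtain ⟨k, rfl, hk⟩ := (powB_mem n p).mp hp
    have hlp : 1 ≤ (pyBin (5 ^ k)).length :=
      List.length_pos_iff.mpr (pyBin_ne_nil _)
    exact ⟨by omega, hpl, k, hsub.symm ▸ rfl, hk⟩
  · rintro ⟨htj, hjn, k, hsub, hk⟩
    refine ⟨pyBin (5 ^ k), (powB_mem n _).mpr ⟨k, rfl, hk⟩, ?_, ?_, ?_⟩
    · have : (pyBin (5 ^ k)).length = j - t := by
        rw [← hsub, sub_length l t j (by omega) (by omega)]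
      omega
    · have : (pyBin (5 ^ k)).length = j - t := by
        rw [← hsub, sub_length l t j (by omega) (by omega)]
      rw [this]
      have : t + (j - t) = j := by omega
      rw [this, hsub]
    · have : (pyBin (5 ^ k)).length = j - t := by
        rw [← hsub, sub_length l t j (by omega) (by omega)]
      omega


-- ---- BFS ----

lemma procEdges_spec (n : Nat) : ∀ (js : List Nat) (seen : List Bool) (nxt : List Nat),
    seen.length = n + 1 → (∀ j ∈ js, j ≤ n) → nxt.Nodup →
    (∀ t, t ∈ nxt → seen.getD t false = true) →
    (procEdges js seen nxt).1.length = n + 1 ∧ (procEdges js seen nxt).2.Nodup ∧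
    (∀ t, t ∈ (procEdges js seen nxt).2 ↔ t ∈ nxt ∨ (t ∈ js ∧ seen.getD t false = false)) ∧
    (∀ t, (procEdges js seen nxt).1.getD t false = true ↔
      seen.getD t false = true ∨ t ∈ (procEdges js seen nxt).2) := by
  intro js
  induction js with
  | nil =>
    intro seen nxt hlen hjs hnd hseen
    refine ⟨hlen, hnd, fun t => by simp [procEdges], fun t => ?_⟩
    rw [procEdges]
    exact ⟨Or.inl, fun h => h.elim id (hseen t)⟩
  | cons j rest ih =>
    intro seen nxt hlen hjs hnd hseen
    have hjn : j ≤ n := hjs j (by simp)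
    by_cases hj : seen.getD j false = true
    · rw [procEdges, if_pos hj]
      obtain ⟨c1, c2, c3, c4⟩ := ih seen nxt hlen (fun x hx => hjs x (by simp [hx])) hnd hseen
      refine ⟨c1, c2, fun t => ?_, c4⟩
      rw [c3 t]
      constructor
      · rintro (h | ⟨h1, h2⟩)
        · exact Or.inl h
        · exact Or.inr ⟨by simp [h1], h2⟩
      · rintro (h | ⟨h1, h2⟩)
        · exact Or.inl h
        · rcases List.mem_cons.mp h1 with rfl | h1
          · rw [hj] at h2; cases h2
          · exact Or.inr ⟨h1, h2⟩
    · rw [procEdges, if_neg hj]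
      have hjf : seen.getD j false = false := by
        cases hc : seen.getD j false
        · rfl
        · exact absurd hc hj
      have hlen' : (seen.set j true).length = n + 1 := by simp [hlen]
      have hget : ∀ t, (seen.set j true).getD t false =
          if t = j then true else seen.getD t false := by
        intro t
        exact getD_set seen j t true false (by omega)
      obtain ⟨c1, c2, c3, c4⟩ := ih (seen.set j true) (nxt ++ [j]) hlen'
        (fun x hx => hjs x (by simp [hx]))
        (by
          refine List.Nodup.append hnd (by simp) ?_
          intro a ha hb
          simp at hb
          subst hb
          have := hseen a ha
          rw [this] at hjf; cases hjf)
        (by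
          intro t ht
          rcases List.mem_append.mp ht with ht | ht
          · rw [hget t]
            split
            · rfl
            · exact hseen t ht
          · simp at ht; subst ht
            rw [hget t, if_pos rfl])
      refine ⟨c1, c2, fun t => ?_, fun t => ?_⟩
      · rw [c3 t]
        constructor
        · rintro (h | ⟨h1, h2⟩)
          · rcases List.mem_append.mp h with h | h
            · exact Or.inl h
            · simp at h; subst h
              exact Or.inr ⟨by simp, hjf⟩
          · rw [hget t] at h2
            split at h2
            · cases h2
            · exact Or.inr ⟨by simp [h1], h2⟩
        · rintro (h | ⟨h1, h2⟩)
          · exact Or.inl (by simp [h])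
          · rcases List.mem_cons.mp h1 with rfl | h1
            · exact Or.inl (by simp)
            · by_cases htj : t = j
              · subst htj; exact Or.inl (by simp)
              · refine Or.inr ⟨h1, ?_⟩
                rw [hget t, if_neg htj]
                exact h2
      · rw [c4 t, hget t]
        constructor
        · rintro (h | h)
          · split at h
            · next htj =>
              subst htj
              right
              rw [c3]
              exact Or.inl (by simp)
            · exact Or.inl h
          · exact Or.inr h
        · rintro (h | h)
          · left; split
            · rfl
            · exact h
          · exact Or.inr h


lemma procF_inl (edges : List (List Nat)) (n : Nat) :
    ∀ (frontier : List Nat) (seen : List Bool) (nxt : List Nat) (dist : Int),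
    n ∈ frontier → procF edges n frontier seen nxt dist = .inl dist := by
  intro frontier
  induction frontier with
  | nil => intro _ _ _ h; cases h
  | cons i rest ih =>
    intro seen nxt dist h
    by_cases hi : i = n
    · subst hi; rw [procF, if_pos rfl]
    · rcases List.mem_cons.mp h with h | h
      · exact absurd h.symm hi
      · rw [procF, if_neg hi]
        exact ih _ _ _ h


lemma procF_inr (edges : List (List Nat)) (n : Nat)
    (hedge : ∀ i, i ≤ n → ∀ j, j ∈ edges.getD i [] → j ≤ n) :
    ∀ (frontier : List Nat) (seen : List Bool) (nxt : List Nat) (dist : Int),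
    n ∉ frontier → (∀ i ∈ frontier, i ≤ n) → seen.length = n + 1 → nxt.Nodup →
    (∀ t, t ∈ nxt → seen.getD t false = true) →
    ∃ seen' nxt', procF edges n frontier seen nxt dist = .inr (seen', nxt') ∧
      seen'.length = n + 1 ∧ nxt'.Nodup ∧
      (∀ t, t ∈ nxt' ↔ t ∈ nxt ∨ ∃ i ∈ frontier, (t ∈ edges.getD i [] ∧ seen.getD t false = false)) ∧
      (∀ t, seen'.getD t false = true ↔ seen.getD t false = true ∨ t ∈ nxt') := by
  intro frontier
  induction frontier with
  | nil =>
    intro seen nxt dist hnf hfr hlen hnd hseen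
    exact ⟨seen, nxt, rfl, hlen, hnd, fun t => by simp,
      fun t => ⟨Or.inl, fun h => h.elim id (hseen t)⟩⟩
  | cons i rest ih =>
    intro seen nxt dist hnf hfr hlen hnd hseen
    have hin : i ≤ n := hfr i (by simp)
    have hine : i ≠ n := fun h => hnf (h ▸ by simp)
    rw [procF, if_neg hine]
    obtain ⟨c1, c2, c3, c4⟩ := procEdges_spec n (edges.getD i []) seen nxt hlen
      (fun j hj => hedge i hin j hj) hnd hseen
    rcases hpe : procEdges (edges.getD i []) seen nxt with ⟨seen1, nxt1⟩
    rw [hpe] at c1 c2 c3 c4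
    dsimp only at c1 c2 c3 c4 ⊢
    obtain ⟨seen', nxt', heq, d1, d2, d3, d4⟩ := ih seen1 nxt1 dist
      (fun h => hnf (by simp [h])) (fun x hx => hfr x (by simp [hx])) c1 c2
      (fun t ht => (c4 t).mpr (Or.inr ht))
    refine ⟨seen', nxt', heq, d1, d2, fun t => ?_, fun t => ?_⟩
    · rw [d3 t]
      constructor
      · rintro (h | ⟨i', hi', he', hs'⟩)
        · rcases (c3 t).mp h with h | ⟨h1, h2⟩
          · exact Or.inl h
          · exact Or.inr ⟨i, by simp, h1, h2⟩
        · have hsf : seen.getD t false = false := by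
            cases hc : seen.getD t false
            · rfl
            · rw [(c4 t).mpr (Or.inl hc)] at hs'; cases hs'
          exact Or.inr ⟨i', by simp [hi'], he', hsf⟩
      · rintro (h | ⟨i', hi', he', hs'⟩)
        · exact Or.inl ((c3 t).mpr (Or.inl h))
        · rcases List.mem_cons.mp hi' with rfl | hi'
          · exact Or.inl ((c3 t).mpr (Or.inr ⟨he', hs'⟩))
          · by_cases ht1 : t ∈ nxt1
            · exact Or.inl ht1
            · refine Or.inr ⟨i', hi', he', ?_⟩
              cases hc : seen1.getD t false
              · rfl
              · rcases (c4 t).mp hc with hc' | hc'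
                · rw [hc'] at hs'; cases hs'
                · exact absurd hc' ht1
    · rw [d4 t, c4 t]
      constructor
      · rintro ((h | h) | h)
        · exact Or.inl h
        · exact Or.inr ((d3 t).mpr (Or.inl h))
        · exact Or.inr h
      · rintro (h | h)
        · exact Or.inl (Or.inl h)
        · exact Or.inr h


-- ---- minimal distances ----

lemma exists_minD {l : List Char} {n t k : Nat} (h : RB l n n t k) :
    ∃ d, MinD l n t d ∧ d ≤ k := by
  induction k using Nat.strong_induction_on generalizing t with
  | _ k ih =>
    by_cases hmin : ∀ k', RB l n n t k' → k ≤ k'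
    · exact ⟨k, ⟨h, hmin⟩, le_refl k⟩
    · push_neg at hmin
      obtain ⟨k', hk', hlt⟩ := hmin
      obtain ⟨d, hd, hdk⟩ := ih k' hlt hk'
      exact ⟨d, hd, by omega⟩


lemma minD_succ_iff {l : List Char} {n t d : Nat} :
    MinD l n t (d + 1) ↔ (∃ i, MinD l n i d ∧ Edge l n i t) ∧ (∀ k, k ≤ d → ¬ RB l n n t k) := by
  constructor
  · rintro ⟨h, hmin⟩
    obtain ⟨i, hci, hei⟩ := rb_succ_decomp h
    have hnot : ∀ k, k ≤ d → ¬ RB l n n t k := fun k hk hc => by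
      have := hmin k hc; omega
    refine ⟨⟨i, ⟨hci, fun k hk => ?_⟩, hei⟩, hnot⟩
    by_contra hlt
    push_neg at hlt
    have : RB l n n t (k + 1) := RB.succ (rb_mono hk (le_refl n)) hei (by
      obtain ⟨h1, h2, -⟩ := hei
      omega)
    have := hmin (k + 1) this
    omega
  · rintro ⟨⟨i, ⟨hci, hmini⟩, hei⟩, hnot⟩
    refine ⟨RB.succ hci hei (by obtain ⟨h1, h2, -⟩ := hei; omega), ?_⟩
    intro k hk
    by_contra hlt
    push_neg at hlt
    exact hnot k (by omega) hk


lemma no_minD_ge {l : List Char} {n d : Nat} (h : ∀ t, ¬ MinD l n t d) :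
    ∀ e, d ≤ e → ∀ t, ¬ MinD l n t e := by
  intro e he
  induction e with
  | zero =>
    have : d = 0 := by omega
    subst this
    exact h
  | succ e ih =>
    by_cases hd : d = e + 1
    · subst hd; exact h
    · have := ih (by omega)
      intro t hmd
      obtain ⟨⟨i, hdi, -⟩, -⟩ := minD_succ_iff.mp hmd
      exact this i hdi


lemma no_reach_of_no_level {l : List Char} {n d : Nat} (hnone : ∀ t, ¬ MinD l n t d)
    (hnr : ∀ k, k < d → ¬ RB l n n n k) : ∀ k, ¬ RB l n n n k := by
  intro k hR
  obtain ⟨d', hmd', -⟩ := exists_minD hR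
  by_cases hlt : d' < d
  · exact hnr d' hlt hmd'.1
  · exact no_minD_ge hnone d' (by omega) n hmd'

lemma bfs_spec (l : List Char) (n : Nat) (hn : n = l.length) (edges : List (List Nat))
    (hE : ∀ t, t ≤ n → ∀ j, (j ∈ edges.getD t [] ↔ Edge l n t j)) :
    ∀ (fuel : Nat) (frontier : List Nat) (seen : List Bool) (d : Nat),
    n + 2 ≤ fuel + d → seen.length = n + 1 → frontier.Nodup →
    (∀ t, t ∈ frontier ↔ t ≤ n ∧ MinD l n t d) →
    (∀ t, t ≤ n → (seen.getD t false = true ↔ ∃ k, k ≤ d ∧ RB l n n t k)) →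
    (∀ k, k < d → ¬ RB l n n n k) →
    (∃ d', MinD l n n d' ∧ bfsLoop edges n fuel frontier seen (d : Int) = (d' : Int)) ∨
    ((∀ k, ¬ RB l n n n k) ∧ bfsLoop edges n fuel frontier seen (d : Int) = -1) := by
  intro fuel
  induction fuel with
  | zero =>
    intro frontier seen d hfuel hlen hnd hfr hseen hnr
    rcases hne : frontier with _ | ⟨t0, rest⟩
    · right
      refine ⟨?_, rfl⟩
      refine no_reach_of_no_level ?_ hnr
      intro u hmd
      have hun : u ≤ n := (rb_bounds hmd.1).2
      exact absurd ((hfr u).mpr ⟨hun, hmd⟩) (by rw [hne]; simp)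
    · exfalso
      have ht0 := (hfr t0).mp (hne ▸ by simp)
      obtain ⟨hk, htn⟩ := rb_bounds ht0.2.1
      omega
  | succ f ih =>
    intro frontier seen d hfuel hlen hnd hfr hseen hnr
    rw [bfsLoop]
    by_cases hfe : frontier = []
    · rw [if_pos hfe]
      right
      refine ⟨?_, rfl⟩
      refine no_reach_of_no_level ?_ hnr
      intro u hmd
      have hun : u ≤ n := (rb_bounds hmd.1).2
      exact absurd ((hfr u).mpr ⟨hun, hmd⟩) (by rw [hfe]; simp)
    · rw [if_neg hfe]
      by_cases hmem : n ∈ frontier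
      · rw [procF_inl edges n frontier seen [] (d : Int) hmem]
        exact Or.inl ⟨d, ((hfr n).mp hmem).2, rfl⟩
      · have hedge : ∀ i, i ≤ n → ∀ j, j ∈ edges.getD i [] → j ≤ n := by
          intro i hi j hj
          exact ((hE i hi j).mp hj).2.1
        obtain ⟨seen', nxt', heq, c1, c2, c3, c4⟩ := procF_inr edges n hedge frontier seen []
          (d : Int) hmem (fun i hi => ((hfr i).mp hi).1) hlen (by simp) (by simp)
        rw [heq]
        have hnxt : ∀ t, t ∈ nxt' ↔ t ≤ n ∧ MinD l n t (d + 1) := by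
          intro t
          rw [c3 t]
          simp only [List.not_mem_nil, false_or]
          constructor
          · rintro ⟨i, hifr, hie, hsf⟩
            obtain ⟨hin, hmdi⟩ := (hfr i).mp hifr
            have hedge_it : Edge l n i t := (hE i hin t).mp hie
            have htn : t ≤ n := hedge_it.2.1
            refine ⟨htn, minD_succ_iff.mpr ⟨⟨i, hmdi, hedge_it⟩, ?_⟩⟩
            intro k hk hR
            have : seen.getD t false = true := (hseen t htn).mpr ⟨k, hk, hR⟩
            rw [hsf] at this; cases this
          · rintro ⟨htn, hmd⟩
            obtain ⟨⟨i, hmdi, hedge_it⟩, hnot⟩ := minD_succ_iff.mp hmd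
            have hin : i ≤ n := (rb_bounds hmdi.1).2
            refine ⟨i, (hfr i).mpr ⟨hin, hmdi⟩, (hE i hin t).mpr hedge_it, ?_⟩
            cases hc : seen.getD t false
            · rfl
            · obtain ⟨k, hk, hR⟩ := (hseen t htn).mp hc
              exact absurd hR (hnot k hk)
        have hseen' : ∀ t, t ≤ n → (seen'.getD t false = true ↔ ∃ k, k ≤ d + 1 ∧ RB l n n t k) := by
          intro t htn
          rw [c4 t, hseen t htn, hnxt t]
          constructor
          · rintro (⟨k, hk, hR⟩ | ⟨-, hmd⟩)
            · exact ⟨k, by omega, hR⟩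
            · exact ⟨d + 1, le_refl _, hmd.1⟩
          · rintro ⟨k, hk, hR⟩
            by_cases hkd : k ≤ d
            · exact Or.inl ⟨k, hkd, hR⟩
            · obtain ⟨d'', hmd'', hd''⟩ := exists_minD hR
              by_cases hdd : d'' ≤ d
              · exact Or.inl ⟨d'', hdd, hmd''.1⟩
              · have : d'' = d + 1 := by omega
                exact Or.inr ⟨htn, this ▸ hmd''⟩
        have hnr' : ∀ k, k < d + 1 → ¬ RB l n n n k := by
          intro k hk hR
          by_cases hkd : k < d
          · exact hnr k hkd hR
          · have hkeq : k = d := by omega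
            rw [hkeq] at hR
            obtain ⟨d'', hmd'', hd''⟩ := exists_minD hR
            by_cases hlt : d'' < d
            · exact hnr d'' hlt hmd''.1
            · have : d'' = d := by omega
              subst this
              exact hmem ((hfr n).mpr ⟨le_refl n, hmd''⟩)
        have hcast : (d : Int) + 1 = ((d + 1 : Nat) : Int) := by push_cast; ring
        rw [hcast]
        exact ih nxt' seen' (d + 1) (by omega) c1 c2 hnxt hseen' hnr'


-- ===== VERDICT (by name: the statement is the Claim_ definition above) =====
theorem cuts_spec : Claim_equal_cuts := by
  intro s hdom hpre
  unfold Spec_cuts cuts cuts_alt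
  set l := s.toList with hl
  set n := l.length with hn
  change (match (outerA l n (buildPowersA (2 ^ n - 1) 1 (Nat.le_refl 1) PySem.Set.empty) 0
      ((List.replicate (n + 1) (none : Option Int)).set 0 (some 0))).getD n none with
    | some v => v
    | none => -1) =
    bfsLoop ((buildPowList n 1 (Nat.le_refl 1) []).foldl (fun e p => addPow l n p 0 e)
      (List.replicate (n + 1) ([] : List Nat))) n (n + 2) [0]
      ((List.replicate (n + 1) false).set 0 true) (((0 : Nat) : Int))
  obtain ⟨hAlen, hAinv⟩ := outerA_inv l n
    (buildPowersA (2 ^ n - 1) 1 (Nat.le_refl 1) PySem.Set.empty) (HA_final n) rfl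
    n 0 ((List.replicate (n + 1) (none : Option Int)).set 0 (some 0)) (by omega) (by omega)
    (by simp)
    (by
      intro t ht
      by_cases ht0 : t = 0
      · subst ht0
        rw [getD_set _ _ _ _ _ (by simp), if_pos rfl]
        exact ⟨0, rfl, RB.zero 0, fun k _ => Nat.zero_le k⟩
      · rw [getD_set _ _ _ _ _ (by simp), if_neg ht0]
        have : (List.replicate (n + 1) (none : Option Int)).getD t none = none := by
          simp [List.getD_eq_getElem?_getD, List.getElem?_replicate]
          split <;> rfl
        rw [this]
        intro k hk
        exact ht0 (rb_zero hk).1)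
  have hOpt := hAinv n (le_refl n)
  have hB := bfs_spec l n rfl
    ((buildPowList n 1 (Nat.le_refl 1) []).foldl (fun e p => addPow l n p 0 e)
      (List.replicate (n + 1) ([] : List Nat)))
    (fun t ht j => edge_iff l n rfl t ht j)
    (n + 2) [0] ((List.replicate (n + 1) false).set 0 true) 0
    (by omega) (by simp) (by simp)
    (by
      intro t
      simp only [List.mem_singleton]
      constructor
      · rintro rfl
        exact ⟨Nat.zero_le n, ⟨RB.zero n, fun k _ => Nat.zero_le k⟩⟩
      · rintro ⟨-, hmd⟩
        exact rb_len_zero hmd.1)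
    (by
      intro t ht
      by_cases ht0 : t = 0
      · subst ht0
        rw [getD_set _ _ _ _ _ (by simp), if_pos rfl]
        simp only [true_iff]
        exact ⟨0, le_refl 0, RB.zero n⟩
      · rw [getD_set _ _ _ _ _ (by simp), if_neg ht0]
        have : (List.replicate (n + 1) false).getD t false = false := by
          simp [List.getD_eq_getElem?_getD, List.getElem?_replicate]
          split <;> rfl
        rw [this]
        simp only [Bool.false_eq_true, false_iff]
        rintro ⟨k, hk, hR⟩
        have : k = 0 := by omega
        subst this
        exact ht0 (rb_len_zero hR))
    (by omega)
  rcases hdp : (outerA l n (buildPowersA (2 ^ n - 1) 1 (Nat.le_refl 1) PySem.Set.empty) 0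
      ((List.replicate (n + 1) (none : Option Int)).set 0 (some 0))).getD n none with _ | v
  · rw [hdp] at hOpt
    rcases hB with ⟨d', hmd', heq⟩ | ⟨hno, heq⟩
    · exact absurd hmd'.1 (hOpt d')
    · exact heq.symm
  · rw [hdp] at hOpt
    obtain ⟨m, rfl, hRm, hmin⟩ := hOpt
    rcases hB with ⟨d', hmd', heq⟩ | ⟨hno, heq⟩
    · have h1 : d' ≤ m := hmd'.2 m hRm
      have h2 : m ≤ d' := hmin d' hmd'.1
      have hdm : d' = m := by omega
      rw [hdm] at heq
      exact heq.symm
    · exact absurd hRm (hno m)
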